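-- pv_equiv track=rewrite | github.com/systragroup/quetzal | quetzal/engine/csa.py | get_full_csa_path
-- ===== SOURCE A (Python) =====
-- import bisect
--
-- def trip_bit(c_in: int, c_out: int, trip_connections: list[int]):
--     left = bisect.bisect_left(trip_connections, c_in)
--     right = bisect.bisect_left(trip_connections, c_out)
--     return trip_connections[left:right]
--
-- def get_full_csa_path(path, trip_dict, trip_connections):
--     full_path = []
--     for j in range(len(path) - 1):
--         c_in = path[j]
--         c_out = path[j + 1]
--         trip_in = trip_dict[c_in]
--         trip_out = trip_dict[c_out]
--         full_path.append(c_in)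
--         if trip_in == trip_out:
--             # first value already append
--             bit = trip_bit(c_in, c_out, trip_connections.get(trip_in))[1:]
--             full_path += bit
--     full_path.append(path[-1])
--     return full_path
-- ===== SOURCE B (Python) =====
-- def get_full_csa_path(path, trip_dict, trip_connections):
--     def segment(a, b):
--         t = trip_dict[a]
--         if t != trip_dict[b]:
--             return [a]
--         # trip_connections[t] is sorted, so the bisect slice is exactly this filter
--         mid = [x for x in trip_connections[t] if a <= x < b]
--         return [a] + mid[1:]
--     out = [x for a, b in zip(path, path[1:]) for x in segment(a, b)]
--     out.append(path[-1])
--     return out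
-- ===== Notes on version B (the rewrite author's own statement) =====
-- stated objective: simpler
-- what changed: B removes the binary searches entirely: because the consulted connection list is sorted (the bisect module's precondition, stated in Pre_), each pair's bisect slice is computed as one linear filter c_in <= x < c_out with its first element dropped, assembled by a flat comprehension over consecutive path pairs instead of A's index loop with mutation.
-- outside the precondition, e.g. on get_full_csa_path([1, 2], {1: 5, 2: 5}, {5: [2, 1]}): A returns [1, 1, 2], B returns [1, 2]
import Mathlib
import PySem

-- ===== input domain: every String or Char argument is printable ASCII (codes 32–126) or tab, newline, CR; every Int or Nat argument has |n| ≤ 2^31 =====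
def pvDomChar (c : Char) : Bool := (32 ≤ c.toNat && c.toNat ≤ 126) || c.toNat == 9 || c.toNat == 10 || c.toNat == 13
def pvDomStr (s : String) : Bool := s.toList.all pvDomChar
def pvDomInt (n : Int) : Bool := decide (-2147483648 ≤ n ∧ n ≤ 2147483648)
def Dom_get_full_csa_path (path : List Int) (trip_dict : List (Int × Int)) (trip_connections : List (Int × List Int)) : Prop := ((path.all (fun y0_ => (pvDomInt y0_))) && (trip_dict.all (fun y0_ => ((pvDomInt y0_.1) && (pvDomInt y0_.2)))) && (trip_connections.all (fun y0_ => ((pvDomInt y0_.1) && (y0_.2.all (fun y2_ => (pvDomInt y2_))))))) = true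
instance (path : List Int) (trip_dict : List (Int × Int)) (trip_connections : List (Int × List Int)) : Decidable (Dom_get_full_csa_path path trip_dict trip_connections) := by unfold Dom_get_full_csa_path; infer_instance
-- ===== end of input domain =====

-- B drops the binary searches entirely: since the consulted connection list is sorted
-- (a bisect precondition, stated in Pre_), the bisect slice per pair is one linear
-- filter c_in ≤ x < c_out with its first element dropped, assembled by a flat
-- comprehension over consecutive pairs (objective: simpler, same behaviour on Pre_).
-- ===== PORT A =====
-- dict[k] lookup; the default is only reached where Python raises KeyError (outside Pre_)
def pvAGetTrip (d : List (Int × Int)) (k : Int) : Int :=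
  ((PySem.Dict.mk d).get? k).getD 0
-- dict.get(k): returns None for a missing key; Pre_ guarantees the key is present
def pvAGetConns (d : List (Int × List Int)) (k : Int) : List Int :=
  ((PySem.Dict.mk d).get? k).getD []
-- bisect.bisect_left, CPython's while-loop; fuel is only a totality guard (hi - lo shrinks
-- each iteration, so fuel = initial hi - lo is never exhausted; at fuel 0, hi ≤ lo and the
-- loop would stop anyway). a.getD mid 0 is exact: mid is always in range while lo < hi ≤ len a
def pvBisectLoop (fuel : Nat) (a : List Int) (x : Int) (lo hi : Nat) : Nat :=
  match fuel with
  | 0 => lo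
  | fuel + 1 =>
    if lo < hi then
      let mid := (lo + hi) / 2
      if a.getD mid 0 < x then pvBisectLoop fuel a x (mid + 1) hi
      else pvBisectLoop fuel a x lo mid
    else lo

def pvBisectLeft (a : List Int) (x : Int) : Nat :=
  pvBisectLoop a.length a x 0 a.length

def trip_bit (c_in : Int) (c_out : Int) (trip_connections : List Int) : List Int :=
  let left := pvBisectLeft trip_connections c_in
  let right := pvBisectLeft trip_connections c_out
  PySem.List.slice trip_connections (some (left : Int)) (some (right : Int))

def get_full_csa_path (path : List Int) (trip_dict : List (Int × Int)) (trip_connections : List (Int × List Int)) : List Int :=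
  let full_path : List Int := []
  let full_path := (PySem.List.pyRange 0 ((path.length : Int) - 1) 1).foldl
    (fun full_path j =>
      let c_in := PySem.List.pyGetD path j 0
      let c_out := PySem.List.pyGetD path (j + 1) 0
      let trip_in := pvAGetTrip trip_dict c_in
      let trip_out := pvAGetTrip trip_dict c_out
      let full_path := full_path ++ [c_in]
      if trip_in == trip_out then
        full_path ++ PySem.List.slice (trip_bit c_in c_out (pvAGetConns trip_connections trip_in)) (some 1) none
      else full_path) full_path
  full_path ++ [PySem.List.pyGetD path (-1) 0]

-- ===== PORT B =====
-- first-match association lookup (Python dict); default reached only where Python raises KeyError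
def pvBLookupTrip (d : List (Int × Int)) (k : Int) : Int :=
  ((d.find? (fun p => p.1 == k)).map (·.2)).getD 0
def pvBLookupConns (d : List (Int × List Int)) (k : Int) : List Int :=
  ((d.find? (fun p => p.1 == k)).map (·.2)).getD []

-- segment(a, b): no search — one linear filter, then mid[1:]
def pvSegment (a b : Int) (trip_dict : List (Int × Int)) (trip_connections : List (Int × List Int)) : List Int :=
  let t := pvBLookupTrip trip_dict a
  if t ≠ pvBLookupTrip trip_dict b then [a]
  else
    let mid := (pvBLookupConns trip_connections t).filter (fun x => decide (a ≤ x) && decide (x < b))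
    [a] ++ PySem.List.slice mid (some 1) none

def get_full_csa_path_alt (path : List Int) (trip_dict : List (Int × Int)) (trip_connections : List (Int × List Int)) : List Int :=
  ((path.zip (path.drop 1)).flatMap (fun p => pvSegment p.1 p.2 trip_dict trip_connections))
    ++ [path.getLast?.getD 0]   -- path[-1]; the default is only reached for empty path (IndexError, outside Pre_)

-- ===== PRECONDITION & SPEC =====
-- Pre_ excludes the inputs where Python A raises (empty path: IndexError at path[-1]; a path
-- element missing from trip_dict: KeyError; a same-trip pair whose trip is missing from
-- trip_connections: .get returns None, TypeError inside bisect) and the inputs where a consulted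
-- same-trip connection list is unsorted, on which bisect's slice is an accidental value (the
-- bisect module requires sorted input) that B's linear filter defensibly need not reproduce.
def Pre_get_full_csa_path (path : List Int) (trip_dict : List (Int × Int)) (trip_connections : List (Int × List Int)) : Prop :=
  path ≠ [] ∧
  ∀ p ∈ path.zip (path.drop 1),
    ((PySem.Dict.mk trip_dict).get? p.1).isSome ∧
    ((PySem.Dict.mk trip_dict).get? p.2).isSome ∧
    ((PySem.Dict.mk trip_dict).get? p.1 = (PySem.Dict.mk trip_dict).get? p.2 →
      ((PySem.Dict.mk trip_connections).get? (((PySem.Dict.mk trip_dict).get? p.1).getD 0)).isSome ∧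
      (((PySem.Dict.mk trip_connections).get? (((PySem.Dict.mk trip_dict).get? p.1).getD 0)).getD []).Pairwise (· ≤ ·))
instance (path : List Int) (trip_dict : List (Int × Int)) (trip_connections : List (Int × List Int)) : Decidable (Pre_get_full_csa_path path trip_dict trip_connections) := by unfold Pre_get_full_csa_path; infer_instance
def pvWitness_get_full_csa_path : List Int × (List (Int × Int)) × (List (Int × List Int)) := ([1, 2], [(1, 5), (2, 5)], [(5, [1, 2])])

def Spec_get_full_csa_path (path : List Int) (trip_dict : List (Int × Int)) (trip_connections : List (Int × List Int)) (out : List Int) : Prop := out = get_full_csa_path_alt path trip_dict trip_connections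
instance (path : List Int) (trip_dict : List (Int × Int)) (trip_connections : List (Int × List Int)) (out : List Int) : Decidable (Spec_get_full_csa_path path trip_dict trip_connections out) := by unfold Spec_get_full_csa_path; infer_instance

-- ===== CLAIM (what is proved, stated in full; the proofs are below) =====
def Claim_equal_get_full_csa_path : Prop := ∀ (path : List Int) (trip_dict : List (Int × Int)) (trip_connections : List (Int × List Int)), Dom_get_full_csa_path path trip_dict trip_connections → Pre_get_full_csa_path path trip_dict trip_connections → Spec_get_full_csa_path path trip_dict trip_connections (get_full_csa_path path trip_dict trip_connections)

-- ===== LEMMAS AND PROOFS =====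

-- A's per-pair contribution, factored out of the loop body
def pvASeg (a b : Int) (td : List (Int × Int)) (tc : List (Int × List Int)) : List Int :=
  [a] ++ (if pvAGetTrip td a == pvAGetTrip td b then
      PySem.List.slice (trip_bit a b (pvAGetConns tc (pvAGetTrip td a))) (some 1) none
    else [])

theorem pvLookup_eq {v : Type} (d : List (Int × v)) (k : Int) : ((PySem.Dict.mk d).get? k) = (d.find? (fun p => p.1 == k)).map (·.2) := by
  induction d with
  | nil => rfl
  | cons p rest ih =>
    rw [PySem.Dict.get?_mk_cons]
    by_cases h : p.1 == k
    · simp [h]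
    · simp only [List.find?_cons, h, ih]; simp

-- elements strictly before the takeWhile(< x) frontier are < x
theorem pvTW_lt (x : Int) : ∀ (l : List Int) (i : Nat) (h : i < l.length),
    i < (l.takeWhile (fun v => decide (v < x))).length → l[i] < x := by
  intro l
  induction l with
  | nil => intro i h; simp at h
  | cons c rest ih =>
    intro i h hi
    by_cases hc : c < x
    · have htw : (c :: rest).takeWhile (fun v => decide (v < x)) = c :: rest.takeWhile (fun v => decide (v < x)) := by
        simp [hc]
      rw [htw, List.length_cons] at hi
      cases i with
      | zero => simpa using hc
      | succ j => exact ih j (by simpa using h) (by omega)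
    · have htw : (c :: rest).takeWhile (fun v => decide (v < x)) = [] := by
        simp [hc]
      rw [htw] at hi
      simp at hi

-- on a sorted list, elements at or past the frontier are not < x
theorem pvTW_ge (x : Int) : ∀ (l : List Int), l.Pairwise (· ≤ ·) → ∀ (i : Nat) (h : i < l.length),
    (l.takeWhile (fun v => decide (v < x))).length ≤ i → ¬ l[i] < x := by
  intro l
  induction l with
  | nil => intro _ i h; simp at h
  | cons c rest ih =>
    intro hs i h hi
    obtain ⟨hhead, hrest⟩ := List.pairwise_cons.mp hs
    by_cases hc : c < x
    · have htw : (c :: rest).takeWhile (fun v => decide (v < x)) = c :: rest.takeWhile (fun v => decide (v < x)) := by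
        simp [hc]
      rw [htw, List.length_cons] at hi
      cases i with
      | zero => omega
      | succ j => exact ih hrest j (by simpa using h) (by omega)
    · cases i with
      | zero => simpa using hc
      | succ j =>
        have hj : j < rest.length := by simpa using h
        have hmem : rest[j] ∈ rest := List.getElem_mem hj
        have := hhead _ hmem
        simp only [List.getElem_cons_succ]
        omega

-- binary-search correctness on a sorted list: the loop computes the takeWhile frontier
theorem pvLoop_correct (a : List Int) (x : Int) (hs : a.Pairwise (· ≤ ·)) :
    ∀ (fuel lo hi : Nat), lo ≤ (a.takeWhile (fun v => decide (v < x))).length →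
      (a.takeWhile (fun v => decide (v < x))).length ≤ hi → hi ≤ a.length → hi ≤ lo + fuel →
      pvBisectLoop fuel a x lo hi = (a.takeWhile (fun v => decide (v < x))).length := by
  intro fuel
  induction fuel with
  | zero => intro lo hi h1 h2 _ h4; simp only [pvBisectLoop]; omega
  | succ m ih =>
    intro lo hi h1 h2 h3 h4
    rw [pvBisectLoop]
    by_cases hlt : lo < hi
    · rw [if_pos hlt]
      have hmid : (lo + hi) / 2 < a.length := by omega
      show (if a.getD ((lo + hi) / 2) 0 < x then pvBisectLoop m a x ((lo + hi) / 2 + 1) hi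
          else pvBisectLoop m a x lo ((lo + hi) / 2)) = (a.takeWhile (fun v => decide (v < x))).length
      rw [List.getD_eq_getElem a 0 hmid]
      by_cases hc : a[(lo + hi) / 2] < x
      · rw [if_pos hc]
        have hk : (lo + hi) / 2 < (a.takeWhile (fun v => decide (v < x))).length := by
          by_contra hk
          exact pvTW_ge x a hs _ hmid (by omega) hc
        exact ih _ _ (by omega) h2 h3 (by omega)
      · rw [if_neg hc]
        have hk : (a.takeWhile (fun v => decide (v < x))).length ≤ (lo + hi) / 2 := by
          by_contra hk
          exact hc (pvTW_lt x a _ hmid (by omega))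
        exact ih _ _ h1 hk (by omega) (by omega)
    · rw [if_neg hlt]; omega

theorem pvBisect_frontier (a : List Int) (x : Int) (hs : a.Pairwise (· ≤ ·)) :
    pvBisectLeft a x = (a.takeWhile (fun v => decide (v < x))).length := by
  exact pvLoop_correct a x hs a.length 0 a.length (Nat.zero_le _)
    ((List.takeWhile_prefix _).length_le) le_rfl (by omega)

-- on a sorted list, the slice between the two frontiers is the linear filter
theorem pvDropTakeFilter (a b : Int) : ∀ (l : List Int), l.Pairwise (· ≤ ·) →
    (l.drop (l.takeWhile (fun v => decide (v < a))).length).take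
        ((l.takeWhile (fun v => decide (v < b))).length - (l.takeWhile (fun v => decide (v < a))).length)
      = l.filter (fun x => decide (a ≤ x) && decide (x < b)) := by
  intro l
  induction l with
  | nil => intro _; rfl
  | cons c rest ih =>
    intro hs
    obtain ⟨hhead, hrest⟩ := List.pairwise_cons.mp hs
    have hfail : ¬ c < b → rest.filter (fun x => decide (a ≤ x) && decide (x < b)) = [] := by
      intro hcb
      rw [List.filter_eq_nil_iff]
      intro y hy
      have := hhead y hy
      simp only [Bool.and_eq_true, decide_eq_true_eq]
      omega
    by_cases hca : c < a
    · have ea : (c :: rest).takeWhile (fun v => decide (v < a)) = c :: rest.takeWhile (fun v => decide (v < a)) := by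
        simp [hca]
      by_cases hcb : c < b
      · have eb : (c :: rest).takeWhile (fun v => decide (v < b)) = c :: rest.takeWhile (fun v => decide (v < b)) := by
          simp [hcb]
        rw [ea, eb, List.length_cons, List.length_cons]
        have hsub : (rest.takeWhile (fun v => decide (v < b))).length + 1 - ((rest.takeWhile (fun v => decide (v < a))).length + 1)
            = (rest.takeWhile (fun v => decide (v < b))).length - (rest.takeWhile (fun v => decide (v < a))).length := by omega
        rw [hsub, List.drop_succ_cons, List.filter_cons, if_neg (by simp; omega)]
        exact ih hrest
      · have eb : (c :: rest).takeWhile (fun v => decide (v < b)) = [] := by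
          simp [hcb]
        rw [ea, eb, List.length_nil, Nat.zero_sub, List.take_zero, List.filter_cons,
          if_neg (by simp; omega), hfail hcb]
    · have ea : (c :: rest).takeWhile (fun v => decide (v < a)) = [] := by
        simp [hca]
      have hka : rest.takeWhile (fun v => decide (v < a)) = [] := by
        cases rest with
        | nil => rfl
        | cons y ys =>
          have hy := hhead y (by simp)
          have hya : ¬ y < a := by omega
          simp [hya]
      by_cases hcb : c < b
      · have eb : (c :: rest).takeWhile (fun v => decide (v < b)) = c :: rest.takeWhile (fun v => decide (v < b)) := by
          simp [hcb]
        rw [ea, eb, List.length_nil, List.length_cons, List.drop_zero, Nat.sub_zero,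
          List.take_succ_cons, List.filter_cons, if_pos (by simp; omega)]
        have hih := ih hrest
        rw [hka, List.length_nil, List.drop_zero, Nat.sub_zero] at hih
        rw [hih]
      · have eb : (c :: rest).takeWhile (fun v => decide (v < b)) = [] := by
          simp [hcb]
        rw [ea, eb, List.length_nil, Nat.sub_self, List.take_zero, List.filter_cons,
          if_neg (by simp; omega), hfail hcb]

-- A's bisect slice = B's filter, on a sorted list
theorem pvTripBit_filter (a b : Int) (l : List Int) (hs : l.Pairwise (· ≤ ·)) :
    trip_bit a b l = l.filter (fun x => decide (a ≤ x) && decide (x < b)) := by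
  unfold trip_bit
  rw [pvBisect_frontier l a hs, pvBisect_frontier l b hs, PySem.List.slice_natCast]
  exact pvDropTakeFilter a b l hs

-- the loop body for one consecutive pair equals B's segment, under Pre_'s per-pair facts
theorem pvPair_eq (a b : Int) (td : List (Int × Int)) (tc : List (Int × List Int))
    (ha : ((PySem.Dict.mk td).get? a).isSome) (hb : ((PySem.Dict.mk td).get? b).isSome)
    (hc : (PySem.Dict.mk td).get? a = (PySem.Dict.mk td).get? b →
      (((PySem.Dict.mk tc).get? (((PySem.Dict.mk td).get? a).getD 0)).getD []).Pairwise (· ≤ ·)) :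
    pvASeg a b td tc = pvSegment a b td tc := by
  have hta : pvBLookupTrip td a = pvAGetTrip td a := by
    unfold pvAGetTrip pvBLookupTrip; rw [pvLookup_eq]
  have htb : pvBLookupTrip td b = pvAGetTrip td b := by
    unfold pvAGetTrip pvBLookupTrip; rw [pvLookup_eq]
  have hcn : ∀ k, pvBLookupConns tc k = pvAGetConns tc k := by
    intro k; unfold pvAGetConns pvBLookupConns; rw [pvLookup_eq]
  obtain ⟨u, hu⟩ := Option.isSome_iff_exists.mp ha
  obtain ⟨v, hv⟩ := Option.isSome_iff_exists.mp hb
  have hga : pvAGetTrip td a = u := by unfold pvAGetTrip; rw [hu]; rfl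
  have hgb : pvAGetTrip td b = v := by unfold pvAGetTrip; rw [hv]; rfl
  unfold pvASeg pvSegment
  by_cases heq : u = v
  · have hopt : (PySem.Dict.mk td).get? a = (PySem.Dict.mk td).get? b := by rw [hu, hv, heq]
    have hsorted : (pvAGetConns tc (pvAGetTrip td a)).Pairwise (· ≤ ·) := by
      have hthis := hc hopt
      simp only [hu, Option.getD_some] at hthis
      unfold pvAGetConns
      rw [hga]
      exact hthis
    rw [if_pos (by rw [hga, hgb, heq]; exact beq_self_eq_true v)]
    rw [if_neg (by rw [hta, htb, hga, hgb, heq]; simp)]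
    rw [hta, hcn, pvTripBit_filter a b _ hsorted]
  · rw [if_neg (by rw [hga, hgb]; simpa using heq)]
    rw [if_pos (by rw [hta, htb, hga, hgb]; simpa using heq)]
    simp

-- loop shape: A's fold is a flatMap of A's per-pair segments over the index range
theorem pvLoop_flat (path : List Int) (td : List (Int × Int)) (tc : List (Int × List Int)) :
    get_full_csa_path path td tc =
      ((PySem.List.pyRange 0 ((path.length : Int) - 1) 1).flatMap
        (fun j => pvASeg (PySem.List.pyGetD path j 0) (PySem.List.pyGetD path (j + 1) 0) td tc))
        ++ [PySem.List.pyGetD path (-1) 0] := by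
  unfold get_full_csa_path
  have hb : (fun (acc : List Int) (j : Int) =>
        let c_in := PySem.List.pyGetD path j 0
        let c_out := PySem.List.pyGetD path (j + 1) 0
        let trip_in := pvAGetTrip td c_in
        let trip_out := pvAGetTrip td c_out
        let full_path := acc ++ [c_in]
        if trip_in == trip_out then
          full_path ++ PySem.List.slice (trip_bit c_in c_out (pvAGetConns tc trip_in)) (some 1) none
        else full_path)
      = (fun (acc : List Int) (j : Int) =>
          acc ++ pvASeg (PySem.List.pyGetD path j 0) (PySem.List.pyGetD path (j + 1) 0) td tc) := by
    funext acc j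
    unfold pvASeg
    by_cases hc : pvAGetTrip td (PySem.List.pyGetD path j 0) == pvAGetTrip td (PySem.List.pyGetD path (j + 1) 0)
    · simp [hc, List.append_assoc]
    · simp [hc]
  simp only [hb, PySem.List.foldl_append_eq_flatMap, List.nil_append]

-- index range over consecutive positions = zip with the tail
theorem pvRangeZipNat (h : Int → Int → List Int) : ∀ (path : List Int),
    (List.range (path.length - 1)).flatMap (fun k => h (path.getD k 0) (path.getD (k+1) 0))
    = (path.zip (path.drop 1)).flatMap (fun p => h p.1 p.2) := by
  intro path
  induction path with
  | nil => rfl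
  | cons x xs ih =>
    cases xs with
    | nil => rfl
    | cons y rest =>
      have hlen : (x :: y :: rest).length - 1 = ((y :: rest).length - 1) + 1 := by
        simp [List.length_cons]
      rw [hlen, List.range_succ_eq_map, List.flatMap_cons, List.flatMap_map]
      have hzip : ((x :: y :: rest).zip ((x :: y :: rest).drop 1)) = (x, y) :: ((y :: rest).zip ((y :: rest).drop 1)) := by
        simp [List.zip]
      rw [hzip, List.flatMap_cons]
      rw [← ih]
      have hfun : (fun (a : Nat) => h ((x :: y :: rest).getD a.succ 0) ((x :: y :: rest).getD (a.succ + 1) 0))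
          = (fun (k : Nat) => h ((y :: rest).getD k 0) ((y :: rest).getD (k + 1) 0)) := by
        funext a
        simp [List.getD]
      rw [hfun]
      rfl

theorem pvRange_zip (h : Int → Int → List Int) : ∀ (path : List Int),
    (PySem.List.pyRange 0 ((path.length : Int) - 1) 1).flatMap
      (fun j => h (PySem.List.pyGetD path j 0) (PySem.List.pyGetD path (j + 1) 0))
    = (path.zip (path.drop 1)).flatMap (fun p => h p.1 p.2) := by
  intro path
  rw [PySem.List.pyRange_one, List.flatMap_map, ← pvRangeZipNat h path]
  have htoNat : ((path.length : Int) - 1 - 0).toNat = path.length - 1 := by omega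
  rw [htoNat]
  apply List.flatMap_congr
  intro k hk
  have h2 : (0 : Int) + (k : Int) + 1 = (((k + 1 : Nat)) : Int) := by push_cast; omega
  have h1 : (0 : Int) + (k : Int) = ((k : Nat) : Int) := by omega
  rw [h2, h1, PySem.List.pyGetD_natCast, PySem.List.pyGetD_natCast]

theorem pvLast_eq (path : List Int) : PySem.List.pyGetD path (-1) 0 = path.getLast?.getD 0 := by
  cases path with
  | nil => rfl
  | cons x xs =>
    rw [PySem.List.pyGetD_neg_one (x :: xs) 0 (List.cons_ne_nil x xs),
        List.getLast?_eq_some_getLast (List.cons_ne_nil x xs)]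
    rfl

-- ===== VERDICT (by name: the statement is the Claim_ definition above) =====
theorem get_full_csa_path_spec : Claim_equal_get_full_csa_path := by
  intro path td tc _ hpre
  obtain ⟨_, hpairs⟩ := hpre
  unfold Spec_get_full_csa_path get_full_csa_path_alt
  rw [pvLoop_flat, pvRange_zip (fun a b => pvASeg a b td tc), pvLast_eq]
  congr 1
  apply List.flatMap_congr
  intro p hp
  obtain ⟨ha, hb, hc⟩ := hpairs p hp
  exact pvPair_eq p.1 p.2 td tc ha hb (fun h => (hc h).2)
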